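-- pv_equiv track=rewrite | github.com/kalyaniambare/sampledjangopro | core/test.py | solution
-- ===== SOURCE A (Python) =====
-- def solution(param):
--     param = "".join([str(i) for i in param])
--
--     list = []
--     string_name = ""
--
--     for i in str(param):
--         list.append(i)
--
--     if "-" in list:
--         dash = list.pop(0)
--         string_name += str(dash)
--
--     for i in range(len(list)):
--         for j in range(len(list) - 1):
--
--             if list[j] > list[j + 1]:
--                 list[j], list[j + 1] = list[j + 1], list[j]
--             else:
--                 list[j], list[j + 1] = list[j], list[j + 1]
--     return string_name + "".join(list)
-- ===== SOURCE B (Python) =====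
-- def solution(param):
--     s = "".join(str(i) for i in param)
--     prefix = ""
--     if "-" in s:
--         prefix, s = s[0], s[1:]
--     if not s:
--         return prefix
--     lo = min(map(ord, s))
--     hi = max(map(ord, s))
--     return prefix + "".join(chr(c) * s.count(chr(c)) for c in range(lo, hi + 1))
-- ===== Notes on version B (the rewrite author's own statement) =====
-- stated objective: faster
-- what changed: Replaces A's in-place double-loop bubble sort of the characters by a counting sort: take min/max character codes and emit chr(c)*count(chr(c)) for each code in that range; the join/dash/pop(0) preprocessing is kept exactly.
import Mathlib
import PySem

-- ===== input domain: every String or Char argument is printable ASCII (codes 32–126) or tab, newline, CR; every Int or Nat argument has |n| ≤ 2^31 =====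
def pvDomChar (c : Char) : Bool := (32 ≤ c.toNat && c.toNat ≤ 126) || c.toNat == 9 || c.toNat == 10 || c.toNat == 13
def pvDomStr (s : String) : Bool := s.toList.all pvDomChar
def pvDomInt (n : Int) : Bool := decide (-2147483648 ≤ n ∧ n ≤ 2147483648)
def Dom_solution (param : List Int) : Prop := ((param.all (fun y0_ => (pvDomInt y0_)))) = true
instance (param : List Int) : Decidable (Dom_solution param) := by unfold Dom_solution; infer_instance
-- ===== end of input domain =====

-- B replaces A's quadratic bubble sort of the digit characters by a counting sort
-- (min/max code point, then one scan of the code-point range with per-character counts);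
-- the dash test and the pop(0) of the FIRST character are kept exactly as A does them.

-- ===== PORT A =====
-- one bubble pass: A's inner loop `for j in range(len(list) - 1): compare/swap list[j], list[j+1]`,
-- ported as the structural recursion making the same comparisons and swaps in the same order
def bubblePass : List Char → List Char
  | a :: b :: t => if b < a then b :: bubblePass (a :: t) else a :: bubblePass (b :: t)
  | l => l

def solution (param : List Int) : String :=
  -- param = "".join([str(i) for i in param])
  let s : List Char := PySem.Chars.join [] (param.map PySem.Int.toChars)
  -- list = []; for i in str(param): list.append(i)
  let lst : List Char := s.foldl (fun l c => l ++ [c]) []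
  -- if "-" in list: dash = list.pop(0); string_name += str(dash)
  let pr : List Char × List Char :=
    if '-' ∈ lst then
      match PySem.List.pop? lst 0 with
      | some (d, rest) => ([] ++ [d], rest)
      | none => ([], lst)          -- unreachable: '-' ∈ lst forces lst ≠ []
    else ([], lst)
  -- for i in range(len(list)): one full bubble pass (the else branch is the identity swap)
  let fin : List Char := (List.range pr.2.length).foldl (fun l _ => bubblePass l) pr.2
  -- return string_name + "".join(list)
  String.ofList (pr.1 ++ fin)

-- ===== PORT B =====
def solution_alt (param : List Int) : String :=
  -- s = "".join(str(i) for i in param)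
  let s : List Char := PySem.Chars.join [] (param.map PySem.Int.toChars)
  -- if "-" in s: prefix, s = s[0], s[1:]
  let pr : List Char × List Char :=
    if '-' ∈ s then (s.take 1, s.drop 1) else ([], s)
  -- if not s: return prefix
  if pr.2.isEmpty then String.ofList pr.1
  else
    -- lo = min(map(ord, s)); hi = max(map(ord, s))   (ord/chr ported by hand as Char.toNat /
    -- Char.ofNat, exact here since every code handled is a valid scalar value)
    let ords : List Int := pr.2.map (fun c => (c.toNat : Int))
    let lo : Int := (PySem.List.min? ords (fun x => x)).getD 0   -- some _: pr.2 ≠ []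
    let hi : Int := (PySem.List.max? ords (fun x => x)).getD 0
    -- "".join(chr(c) * s.count(chr(c)) for c in range(lo, hi+1))
    -- (s.count of a one-character string is the count of that character)
    let tail : List Char := (PySem.List.pyRange lo (hi + 1) 1).flatMap
      (fun c => List.replicate (List.count (Char.ofNat c.toNat) pr.2) (Char.ofNat c.toNat))
    String.ofList (pr.1 ++ tail)

-- ===== PRECONDITION & SPEC =====
def Spec_solution (param : List Int) (out : String) : Prop := out = solution_alt param
instance (param : List Int) (out : String) : Decidable (Spec_solution param out) := by unfold Spec_solution; infer_instance

-- ===== CLAIM (what is proved, stated in full; the proofs are below) =====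
def Claim_equal_solution : Prop := ∀ (param : List Int), Dom_solution param → Spec_solution param (solution param)

-- ===== LEMMAS AND PROOFS =====

-- every character either program handles comes from str(i): a digit or '-', so its code is ≤ 102
theorem digitChar_le (n : Nat) : (Nat.digitChar n).toNat ≤ 102 := by
  by_cases h : n ≤ 15
  · interval_cases n <;> decide
  · have e : Nat.digitChar n = '*' := by
      unfold Nat.digitChar
      rw [if_neg (by omega), if_neg (by omega), if_neg (by omega), if_neg (by omega),
        if_neg (by omega), if_neg (by omega), if_neg (by omega), if_neg (by omega),
        if_neg (by omega), if_neg (by omega), if_neg (by omega), if_neg (by omega),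
        if_neg (by omega), if_neg (by omega), if_neg (by omega), if_neg (by omega)]
    rw [e]; decide

theorem toDigitsCore_le (b f : Nat) : ∀ (n : Nat) (acc : List Char),
    (∀ c ∈ acc, c.toNat ≤ 102) → ∀ c ∈ Nat.toDigitsCore b f n acc, c.toNat ≤ 102 := by
  induction f with
  | zero => intro n acc hacc c hc; exact hacc c hc
  | succ f ih =>
    intro n acc hacc c hc
    simp only [Nat.toDigitsCore] at hc
    split at hc
    · rcases List.mem_cons.mp hc with h | h
      · subst h; exact digitChar_le _
      · exact hacc c h
    · refine ih _ _ ?_ c hc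
      intro d hd
      rcases List.mem_cons.mp hd with h | h
      · subst h; exact digitChar_le _
      · exact hacc d h

theorem toChars_le (n : Int) : ∀ c ∈ PySem.Int.toChars n, c.toNat ≤ 102 := by
  intro c hc
  unfold PySem.Int.toChars at hc
  split at hc
  · rcases List.mem_cons.mp hc with h | h
    · subst h; decide
    · exact toDigitsCore_le 10 _ _ [] (by simp) c h
  · exact toDigitsCore_le 10 _ _ [] (by simp) c hc

theorem join_pieces_le (P : Char → Prop) : ∀ (ps : List (List Char)),
    (∀ p ∈ ps, ∀ c ∈ p, P c) → ∀ c ∈ PySem.Chars.join [] ps, P c := by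
  intro ps
  induction ps with
  | nil => intro _ c hc; rw [PySem.Chars.join_nil] at hc; cases hc
  | cons p ps ih =>
    intro h c hc
    cases ps with
    | nil => rw [PySem.Chars.join_singleton] at hc; exact h p (by simp) c hc
    | cons q rest =>
      rw [PySem.Chars.join_cons_cons] at hc
      simp only [List.append_nil, List.mem_append] at hc
      rcases hc with hc | hc
      · exact h p (by simp) c (by simpa using hc)
      · exact ih (fun r hr => h r (List.mem_cons_of_mem _ hr)) c hc

theorem join_chars_le (param : List Int) :
    ∀ c ∈ PySem.Chars.join [] (param.map PySem.Int.toChars), c.toNat ≤ 102 := by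
  refine join_pieces_le _ _ ?_
  intro p hp c hc
  obtain ⟨n, _, rfl⟩ := List.mem_map.mp hp
  exact toChars_le n c hc

-- ---- the bubble-sort side ----
theorem bubblePass_perm (l : List Char) : (bubblePass l).Perm l := by
  fun_induction bubblePass l with
  | case1 a b t h ih => exact (ih.cons b).trans (List.Perm.swap a b t)
  | case2 a b t h ih => exact ih.cons a
  | case3 l h => exact .refl _

theorem bubblePass_of_pairwise (l : List Char) (h : l.Pairwise (· ≤ ·)) : bubblePass l = l := by
  fun_induction bubblePass l with
  | case1 a b t hba ih =>
    have hab : a ≤ b := (List.pairwise_cons.mp h).1 b List.mem_cons_self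
    exact absurd hba (not_lt.mpr hab)
  | case2 a b t hba ih => rw [ih h.of_cons]
  | case3 l h => rfl

theorem bubblePass_split (n : Nat) : ∀ (l₁ l₂ : List Char), l₁.length = n + 1 →
    l₂.Pairwise (· ≤ ·) → (∀ x ∈ l₁, ∀ y ∈ l₂, x ≤ y) →
    ∃ t m, bubblePass (l₁ ++ l₂) = t ++ m :: l₂ ∧ (t ++ [m]).Perm l₁ ∧ (∀ x ∈ l₁, x ≤ m) := by
  induction n with
  | zero =>
    intro l₁ l₂ hlen h2 h12
    obtain ⟨a, rfl⟩ : ∃ a, l₁ = [a] := by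
      cases l₁ with
      | nil => simp at hlen
      | cons a t => cases t with
        | nil => exact ⟨a, rfl⟩
        | cons b t => simp at hlen
    refine ⟨[], a, ?_, by simp, by simp⟩
    have hpw : ((a :: l₂).Pairwise (· ≤ ·)) := List.pairwise_cons.mpr ⟨h12 a (by simp), h2⟩
    simpa using bubblePass_of_pairwise _ hpw
  | succ n ih =>
    intro l₁ l₂ hlen h2 h12
    obtain ⟨a, b, t, rfl⟩ : ∃ a b t, l₁ = a :: b :: t := by
      cases l₁ with
      | nil => simp at hlen
      | cons a t => cases t with
        | nil => simp only [List.length_cons, List.length_nil] at hlen; omega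
        | cons b t => exact ⟨a, b, t, rfl⟩
    by_cases hba : b < a
    · obtain ⟨t', m, he, hp, hm⟩ := ih (a :: t) l₂ (by simp only [List.length_cons] at hlen ⊢; omega) h2
        (by
          intro x hx y hy
          refine h12 x ?_ y hy
          rcases List.mem_cons.mp hx with h|h
          · simp [h]
          · exact List.mem_cons_of_mem _ (List.mem_cons_of_mem _ h))
      refine ⟨b :: t', m, ?_, ?_, ?_⟩
      · simpa [bubblePass, hba] using he
      · exact (hp.cons b).trans (List.Perm.swap a b t)
      · intro x hx
        rcases List.mem_cons.mp hx with h|h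
        · subst h; exact hm x List.mem_cons_self
        · rcases List.mem_cons.mp h with h'|h'
          · subst h'; exact le_of_lt (lt_of_lt_of_le hba (hm a List.mem_cons_self))
          · exact hm x (List.mem_cons_of_mem _ h')
    · obtain ⟨t', m, he, hp, hm⟩ := ih (b :: t) l₂ (by simp only [List.length_cons] at hlen ⊢; omega) h2
        (by
          intro x hx y hy
          refine h12 x ?_ y hy
          rcases List.mem_cons.mp hx with h|h
          · simp [h]
          · exact List.mem_cons_of_mem _ (List.mem_cons_of_mem _ h))
      refine ⟨a :: t', m, ?_, ?_, ?_⟩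
      · simpa [bubblePass, hba] using he
      · exact hp.cons a
      · intro x hx
        rcases List.mem_cons.mp hx with h|h
        · subst h; exact le_trans (not_lt.mp hba) (hm b List.mem_cons_self)
        · exact hm x h

theorem bubble_iter_of_pairwise (k : Nat) (l : List Char) (h : l.Pairwise (· ≤ ·)) :
    bubblePass^[k] l = l := by
  induction k with
  | zero => rfl
  | succ k ih => rw [Function.iterate_succ_apply, bubblePass_of_pairwise l h, ih]

theorem bubble_iter_sorted : ∀ (k : Nat) (l₁ l₂ : List Char), l₁.length ≤ k →
    l₂.Pairwise (· ≤ ·) → (∀ x ∈ l₁, ∀ y ∈ l₂, x ≤ y) →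
    (bubblePass^[k] (l₁ ++ l₂)).Pairwise (· ≤ ·) := by
  intro k
  induction k with
  | zero =>
    intro l₁ l₂ hlen h2 _
    obtain rfl : l₁ = [] := List.length_eq_zero_iff.mp (Nat.le_zero.mp hlen)
    simpa using h2
  | succ k ih =>
    intro l₁ l₂ hlen h2 h12
    cases l₁ with
    | nil =>
      rw [List.nil_append, bubble_iter_of_pairwise _ _ h2]; exact h2
    | cons a t =>
      obtain ⟨t', m, he, hp, hm⟩ := bubblePass_split (a :: t).length.pred (a :: t) l₂ (by simp) h2 h12
      rw [Function.iterate_succ_apply, he]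
      have hmem : ∀ x ∈ t', x ∈ a :: t := fun x hx => hp.subset (List.mem_append_left _ hx)
      have hmmem : m ∈ a :: t := hp.subset (by simp)
      refine ih t' (m :: l₂) ?_ ?_ ?_
      · have := hp.length_eq
        simp only [List.length_append, List.length_cons, List.length_nil] at this hlen
        omega
      · exact List.pairwise_cons.mpr ⟨fun y hy => h12 m hmmem y hy, h2⟩
      · intro x hx y hy
        rcases List.mem_cons.mp hy with h|h
        · subst h; exact hm x (hmem x hx)
        · exact h12 x (hmem x hx) y h

theorem foldl_range_bubble (k : Nat) (l : List Char) :
    (List.range k).foldl (fun l _ => bubblePass l) l = bubblePass^[k] l := by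
  induction k with
  | zero => rfl
  | succ k ih => rw [List.range_succ, List.foldl_append, ih, List.foldl_cons, List.foldl_nil,
      ← Function.iterate_succ_apply' bubblePass k l]

theorem bubble_iter_perm (k : Nat) (l : List Char) : (bubblePass^[k] l).Perm l := by
  induction k with
  | zero => exact .refl _
  | succ k ih => exact (Function.iterate_succ_apply' bubblePass k l ▸
      (bubblePass_perm _).trans ih)

theorem bubble_sorted (l : List Char) :
    ((List.range l.length).foldl (fun l _ => bubblePass l) l).Pairwise (· ≤ ·) := by
  rw [foldl_range_bubble]
  simpa using bubble_iter_sorted l.length l [] (le_refl _) (by simp) (by simp)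

theorem valid_of_le (n : Nat) (h : n ≤ 102) : n.isValidChar := Or.inl (by omega)

theorem char_le_iff (a b : Char) : a ≤ b ↔ a.toNat ≤ b.toNat := Iff.rfl

theorem ofNat_le_ofNat (n m : Nat) (hnm : n ≤ m) (hm : m ≤ 102) : Char.ofNat n ≤ Char.ofNat m := by
  rw [char_le_iff, Char.toNat_ofNat, Char.toNat_ofNat, if_pos (valid_of_le n (le_trans hnm hm)),
    if_pos (valid_of_le m hm)]
  exact hnm

theorem ctail_pairwise (rest : List Char) (lo hi : Int) (hhi : hi ≤ 102) :
    (((PySem.List.pyRange lo (hi + 1) 1).flatMap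
      (fun c => List.replicate (List.count (Char.ofNat c.toNat) rest) (Char.ofNat c.toNat)))).Pairwise (· ≤ ·) := by
  rw [List.pairwise_flatMap]
  constructor
  · intro a _
    exact List.pairwise_replicate.mpr (Or.inr (le_refl _))
  · refine List.Pairwise.imp_of_mem ?_ (PySem.List.pairwise_lt_pyRange_one lo (hi + 1))
    intro c1 c2 h1 h2 hlt x hx y hy
    rw [List.eq_of_mem_replicate hx, List.eq_of_mem_replicate hy]
    have hc2 : c2 ≤ hi := by
      have := (PySem.List.mem_pyRange_one.mp h2).2; omega
    refine ofNat_le_ofNat _ _ ?_ ?_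
    · exact Int.toNat_le_toNat (le_of_lt hlt)
    · omega

theorem sum_single {l : List Int} {x0 : Int} (f : Int → Nat) (k : Nat) (hnd : l.Nodup) (hx : x0 ∈ l)
    (h : ∀ c ∈ l, f c = if c = x0 then k else 0) : (l.map f).sum = k := by
  induction l with
  | nil => cases hx
  | cons a l ih =>
    rw [List.map_cons, List.sum_cons]
    rcases List.mem_cons.mp hx with h0|h0
    · subst h0
      have hz : (l.map f).sum = 0 := by
        apply List.sum_eq_zero
        intro n hn
        obtain ⟨c, hc, rfl⟩ := List.mem_map.mp hn
        have hne : c ≠ x0 := fun he => (List.nodup_cons.mp hnd).1 (he ▸ hc)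
        rw [h c (List.mem_cons_of_mem _ hc), if_neg hne]
      rw [hz, h x0 List.mem_cons_self, if_pos rfl]
      omega
    · have hne : a ≠ x0 := fun he => (List.nodup_cons.mp hnd).1 (he ▸ h0)
      rw [h a List.mem_cons_self, if_neg hne, ih (List.nodup_cons.mp hnd).2 h0
        (fun c hc => h c (List.mem_cons_of_mem _ hc))]
      simp

theorem ctail_count (rest : List Char) (lo hi : Int)
    (hlo : ∀ c ∈ rest, lo ≤ (c.toNat : Int)) (hhi : ∀ c ∈ rest, (c.toNat : Int) ≤ hi)
    (hhi' : hi ≤ 102) (hlo' : 0 ≤ lo) :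
    ∀ x : Char, List.count x ((PySem.List.pyRange lo (hi + 1) 1).flatMap
      (fun c => List.replicate (List.count (Char.ofNat c.toNat) rest) (Char.ofNat c.toNat)))
      = List.count x rest := by
  intro x
  rw [List.count_flatMap]
  have hkey : ∀ c : Int, c ∈ PySem.List.pyRange lo (hi + 1) 1 → c ≠ (x.toNat : Int) →
      Char.ofNat c.toNat ≠ x := by
    intro c hc hne he
    have hb := PySem.List.mem_pyRange_one.mp hc
    have hcval : c.toNat ≤ 102 := by omega
    have : (Char.ofNat c.toNat).toNat = c.toNat := by
      rw [Char.toNat_ofNat, if_pos (valid_of_le _ hcval)]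
    have : c.toNat = x.toNat := by rw [← this, he]
    exact hne (by omega)
  by_cases hx : x ∈ rest
  · refine sum_single _ (List.count x rest) (PySem.List.nodup_pyRange_one lo (hi + 1))
      (PySem.List.mem_pyRange_one.mpr ⟨hlo x hx, by have := hhi x hx; omega⟩) ?_
    intro c hc
    simp only [Function.comp_apply, List.count_replicate]
    by_cases hce : c = (x.toNat : Int)
    · subst hce
      simp [Int.toNat_natCast, Char.ofNat_toNat]
    · rw [if_neg hce, if_neg (by simp [hkey c hc hce])]
  · rw [List.count_eq_zero.mpr hx]
    apply List.sum_eq_zero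
    intro n hn
    obtain ⟨c, hc, rfl⟩ := List.mem_map.mp hn
    simp only [Function.comp_apply, List.count_replicate]
    by_cases he : Char.ofNat c.toNat = x
    · rw [if_pos (by simp [he]), he, List.count_eq_zero.mpr hx]
    · rw [if_neg (by simp [he])]

theorem sort_eq (rest : List Char) (hle : ∀ c ∈ rest, c.toNat ≤ 102) (hne : rest ≠ []) :
    (List.range rest.length).foldl (fun l _ => bubblePass l) rest
      = (PySem.List.pyRange (((PySem.List.min? (rest.map (fun c => (c.toNat : Int))) (fun x => x)).getD 0))
          ((((PySem.List.max? (rest.map (fun c => (c.toNat : Int))) (fun x => x)).getD 0)) + 1) 1).flatMap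
          (fun c => List.replicate (List.count (Char.ofNat c.toNat) rest) (Char.ofNat c.toNat)) := by
  have hmapne : rest.map (fun c => (c.toNat : Int)) ≠ [] := by
    simpa using hne
  obtain ⟨lom, hlom⟩ : ∃ v, PySem.List.min? (rest.map (fun c => (c.toNat : Int))) (fun x => x) = some v := by
    cases hv : PySem.List.min? (rest.map (fun c => (c.toNat : Int))) (fun x => x) with
    | none => exact absurd ((PySem.List.min?_eq_none_iff _ _).mp hv) hmapne
    | some v => exact ⟨v, rfl⟩
  obtain ⟨him, hhim⟩ : ∃ v, PySem.List.max? (rest.map (fun c => (c.toNat : Int))) (fun x => x) = some v := by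
    cases hv : PySem.List.max? (rest.map (fun c => (c.toNat : Int))) (fun x => x) with
    | none => exact absurd ((PySem.List.max?_eq_none_iff _ _).mp hv) hmapne
    | some v => exact ⟨v, rfl⟩
  rw [hlom, hhim]
  simp only [Option.getD_some]
  -- facts about lom / him
  obtain ⟨c0, hc0, hc0e⟩ := List.mem_map.mp (PySem.List.min?_mem hlom)
  obtain ⟨c1, hc1, hc1e⟩ := List.mem_map.mp (PySem.List.max?_mem hhim)
  have hlo' : 0 ≤ lom := hc0e ▸ Int.natCast_nonneg _
  have hhi' : him ≤ 102 := by
    have := hle c1 hc1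
    omega
  have hlo : ∀ c ∈ rest, lom ≤ (c.toNat : Int) := fun c hc =>
    PySem.List.min?_isMin hlom _ (List.mem_map.mpr ⟨c, hc, rfl⟩)
  have hhi : ∀ c ∈ rest, (c.toNat : Int) ≤ him := fun c hc =>
    PySem.List.max?_isMax hhim _ (List.mem_map.mpr ⟨c, hc, rfl⟩)
  -- both sides are ≤-sorted rearrangements of rest
  have hperm1 : ((List.range rest.length).foldl (fun l _ => bubblePass l) rest).Perm rest := by
    rw [foldl_range_bubble]; exact bubble_iter_perm _ _
  have hperm2 : ((PySem.List.pyRange lom (him + 1) 1).flatMap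
      (fun c => List.replicate (List.count (Char.ofNat c.toNat) rest) (Char.ofNat c.toNat))).Perm rest :=
    List.perm_iff_count.mpr (fun x => ctail_count rest lom him hlo hhi hhi' hlo' x)
  exact List.Perm.eq_of_pairwise (fun a b _ _ h1 h2 => le_antisymm h1 h2)
    (bubble_sorted rest) (ctail_pairwise rest lom him hhi') (hperm1.trans hperm2.symm)

theorem finish_eq (pre rest : List Char) (hle : ∀ c ∈ rest, c.toNat ≤ 102) :
    String.ofList (pre ++ (List.range rest.length).foldl (fun l _ => bubblePass l) rest) =
    if rest.isEmpty then String.ofList pre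
    else String.ofList (pre ++ (PySem.List.pyRange
        ((PySem.List.min? (rest.map fun c => (c.toNat : Int)) fun x => x).getD 0)
        (((PySem.List.max? (rest.map fun c => (c.toNat : Int)) fun x => x).getD 0) + 1) 1).flatMap
        (fun c => List.replicate (List.count (Char.ofNat c.toNat) rest) (Char.ofNat c.toNat))) := by
  by_cases hne : rest = []
  · subst hne; simp
  · rw [if_neg (by simpa using hne), sort_eq rest hle hne]

-- ===== VERDICT (by name: the statement is the Claim_ definition above) =====
theorem solution_spec : Claim_equal_solution := by
  intro param _
  unfold Spec_solution solution solution_alt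
  have hle := join_chars_le param
  generalize hJ : PySem.Chars.join [] (param.map PySem.Int.toChars) = s at hle ⊢
  simp only [PySem.List.foldl_append_singleton, List.nil_append]
  by_cases hd : '-' ∈ s
  · obtain ⟨c, s', rfl⟩ : ∃ c s', s = c :: s' := by
      cases s with
      | nil => cases hd
      | cons c s' => exact ⟨c, s', rfl⟩
    simp only [if_pos hd, PySem.List.pop?_zero_cons, List.take_succ_cons, List.take_zero,
      List.drop_succ_cons, List.drop_zero]
    exact finish_eq [c] s' (fun x hx => hle x (List.mem_cons_of_mem _ hx))
  · simp only [if_neg hd]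
    exact finish_eq [] s hle
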